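-- pv_equiv track=rewrite | github.com/tarpas/pytest-testmon | testmon/process_code.py | the_rest_after
-- ===== SOURCE A (Python) =====
-- END_OF_FILE_MARK = '=END OF FILE='
--
-- class DoesntHaveException(Exception):
--     pass
--
-- def get_real_subblock_length(subblock):
--     subblock_length = len(subblock)
--     if END_OF_FILE_MARK in subblock:
--         return subblock_length - 1
--     else:
--         return subblock_length
--
-- def the_rest_after(act_file_lines, subblock):
--
--     if len(act_file_lines) < get_real_subblock_length(subblock):
--         raise DoesntHaveException()
--
--     i = 0
--
--     for subblock_line in subblock:
--         # This fix case when user add line at the end of file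
--         # TODO It create antoher false positives when non-executed line is added
--         if subblock_line == END_OF_FILE_MARK and i >= len(act_file_lines):
--             i += 1
--             continue
--
--         if subblock_line == act_file_lines[i]:
--             i += 1
--
--     if i == len(subblock):
--         return act_file_lines[i-1:]
--     else:
--         return the_rest_after(act_file_lines[1:], subblock)
-- ===== SOURCE B (Python) =====
-- END_OF_FILE_MARK = '=END OF FILE='
--
-- class DoesntHaveException(Exception):
--     pass
--
-- def the_rest_after(act_file_lines, subblock):
--     m = len(subblock)
--     for k in range(len(act_file_lines) - m + 1):
--         if act_file_lines[k:k + m] == subblock: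
--             return act_file_lines[k + m - 1:]
--     if subblock and subblock[-1] == END_OF_FILE_MARK \
--             and subblock[:-1] == act_file_lines[len(act_file_lines) - m + 1:]:
--         return []
--     raise DoesntHaveException()
-- ===== Notes on version B (the rewrite author's own statement) =====
-- stated objective: simpler
-- what changed: A re-runs a greedy line-by-line counter on every suffix of the file, recursing with an O(n) copy act_file_lines[1:]; B is a direct first-occurrence window scan (one slice comparison per start index) followed by a single trailing-END_OF_FILE_MARK suffix check, which provably yields the same value wherever A returns (both raise on all other inputs).
import Mathlib
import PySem

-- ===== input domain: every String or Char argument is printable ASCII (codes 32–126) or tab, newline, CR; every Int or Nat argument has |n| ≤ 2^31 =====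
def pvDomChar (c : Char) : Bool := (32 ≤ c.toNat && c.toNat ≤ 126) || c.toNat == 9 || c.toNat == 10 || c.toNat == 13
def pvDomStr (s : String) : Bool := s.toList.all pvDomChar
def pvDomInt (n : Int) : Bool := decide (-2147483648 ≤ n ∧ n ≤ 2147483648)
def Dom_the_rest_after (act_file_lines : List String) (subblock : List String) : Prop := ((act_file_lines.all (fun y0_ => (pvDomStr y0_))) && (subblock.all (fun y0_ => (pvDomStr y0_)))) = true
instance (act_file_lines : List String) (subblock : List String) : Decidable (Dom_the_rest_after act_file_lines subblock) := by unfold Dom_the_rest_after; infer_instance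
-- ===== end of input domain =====

-- B replaces A's per-suffix greedy re-scan with recursive slicing by a direct first-occurrence
-- window scan plus one trailing END_OF_FILE_MARK suffix check (objective: simpler; equal return
-- values proved on Pre_, the inputs where A returns instead of raising).

-- ===== PORT A =====
def pvEOF : String := "=END OF FILE="

def get_real_subblock_length (subblock : List String) : Int :=
  if pvEOF ∈ subblock then (subblock.length : Int) - 1 else (subblock.length : Int)

-- the `for subblock_line in subblock` loop of A, carrying the counter `i`;
-- `none` is exactly Python's IndexError on `act_file_lines[i]`
def pvALoop (act : List String) (i : Int) : List String → Option Int
  | [] => some i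
  | L :: rest =>
    if L = pvEOF ∧ (act.length : Int) ≤ i then pvALoop act (i + 1) rest
    else
      match PySem.List.pyGet? act i with
      | none => none
      | some v => pvALoop act (if L = v then i + 1 else i) rest

def the_rest_after (act_file_lines : List String) (subblock : List String) : List String :=
  if (act_file_lines.length : Int) < get_real_subblock_length subblock then []   -- raise DoesntHaveException
  else
    match pvALoop act_file_lines 0 subblock with
    | none => []   -- IndexError
    | some i =>
      if i = (subblock.length : Int) then
        PySem.List.slice act_file_lines (some (i - 1)) none    -- act_file_lines[i-1:]
      else
        match act_file_lines with
        | [] => []   -- Python would recurse forever here; unreachable (the length check would have fired)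
        | _ :: tail => the_rest_after tail subblock            -- act_file_lines[1:]

-- ===== PORT B =====
-- the `for k in range(n - m + 1)` loop of B; the base case is B's code after the loop:
-- the trailing END_OF_FILE_MARK suffix check returning [], else `raise DoesntHaveException` → []
def pvBScan (act : List String) (sub : List String) (m : Int) : List Int → List String
  | [] =>
    if sub ≠ [] ∧ PySem.List.pyGet? sub (-1) = some pvEOF ∧
        PySem.List.slice sub none (some (-1))
          = PySem.List.slice act (some ((act.length : Int) - m + 1)) none then
      []
    else []   -- raise DoesntHaveException
  | k :: ks =>
    if PySem.List.slice act (some k) (some (k + m)) = sub then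
      PySem.List.slice act (some (k + m - 1)) none             -- act_file_lines[k+m-1:]
    else pvBScan act sub m ks

def the_rest_after_alt (act_file_lines : List String) (subblock : List String) : List String :=
  pvBScan act_file_lines subblock (subblock.length : Int)
    (PySem.List.pyRange 0 ((act_file_lines.length : Int) - (subblock.length : Int) + 1) 1)

-- ===== PRECONDITION & SPEC =====
-- Pre_ = exactly the inputs on which A returns normally: subblock occurs contiguously in
-- act_file_lines, or subblock is a suffix of act_file_lines followed by the END_OF_FILE_MARK
-- line; on every other input A raises (DoesntHaveException, or IndexError in some
-- END_OF_FILE_MARK corners) and B raises DoesntHaveException.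
def Pre_the_rest_after (act_file_lines : List String) (subblock : List String) : Prop :=
  subblock <:+: act_file_lines ∨
    (subblock.getLast? = some pvEOF ∧ subblock.dropLast <:+ act_file_lines)
instance (act_file_lines : List String) (subblock : List String) : Decidable (Pre_the_rest_after act_file_lines subblock) := by unfold Pre_the_rest_after; infer_instance

def pvWitness_the_rest_after : List String × List String := (["a", "b"], ["a"])

def Spec_the_rest_after (act_file_lines : List String) (subblock : List String) (out : List String) : Prop := out = the_rest_after_alt act_file_lines subblock
instance (act_file_lines : List String) (subblock : List String) (out : List String) : Decidable (Spec_the_rest_after act_file_lines subblock out) := by unfold Spec_the_rest_after; infer_instance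

-- ===== CLAIM (what is proved, stated in full; the proofs are below) =====
def Claim_equal_the_rest_after : Prop := ∀ (act_file_lines : List String) (subblock : List String), Dom_the_rest_after act_file_lines subblock → Pre_the_rest_after act_file_lines subblock → Spec_the_rest_after act_file_lines subblock (the_rest_after act_file_lines subblock)

-- ===== LEMMAS AND PROOFS =====

-- first index (if any) at which `sub` occurs as a contiguous block of the list
def pvFo (sub : List String) : List String → Option Nat
  | [] => if sub = [] then some 0 else none
  | a :: t => if sub <+: a :: t then some 0 else (pvFo sub t).map (· + 1)

-- common shape of both programs' answers: the tail from the last matched line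
def pvArm (act : List String) (m : Nat) : Option Nat → List String
  | some k => PySem.List.slice act (some ((k : Int) + (m : Int) - 1)) none
  | none => []

lemma pvBScan_nil (act sub : List String) (m : Int) : pvBScan act sub m [] = [] := by
  simp [pvBScan]

lemma pvFo_none_of_short (sub : List String) :
    ∀ act : List String, act.length < sub.length → pvFo sub act = none := by
  intro act
  induction act with
  | nil =>
    intro h
    have : sub ≠ [] := by intro hs; simp [hs] at h
    simp [pvFo, this]
  | cons a t ih =>
    intro h
    have hnp : ¬ sub <+: a :: t := by
      intro hp; have := hp.length_le; omega
    have : t.length < sub.length := by simp at h; omega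
    simp [pvFo, hnp, ih this]

lemma pvALoop_core (act : List String) :
    ∀ (core : List String) (rest : List String) (i : Nat),
      i + core.length ≤ act.length →
      ∃ r : Nat, i ≤ r ∧ r ≤ i + core.length ∧
        pvALoop act (i : Int) (core ++ rest) = pvALoop act (r : Int) rest ∧
        (r = i + core.length ↔ core <+: act.drop i) := by
  intro core
  induction core with
  | nil =>
    intro rest i _
    exact ⟨i, le_refl _, by simp, by simp, by simp⟩
  | cons L c ih =>
    intro rest i hlen
    have hi : i < act.length := by simp at hlen; omega
    have hcond : ¬ (L = pvEOF ∧ (act.length : Int) ≤ (i : Int)) := by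
      rintro ⟨-, h⟩
      have : act.length ≤ i := by exact_mod_cast h
      omega
    have hget : PySem.List.pyGet? act (i : Int) = some act[i] := by
      rw [PySem.List.pyGet?_natCast]
      exact List.getElem?_eq_getElem hi
    have hdrop : act.drop i = act[i] :: act.drop (i + 1) := List.drop_eq_getElem_cons hi
    by_cases hv : L = act[i]
    · obtain ⟨r, hr1, hr2, hr3, hr4⟩ := ih rest (i + 1) (by simp at hlen ⊢; omega)
      refine ⟨r, by omega, by simp; omega, ?_, ?_⟩
      · show pvALoop act (i : Int) ((L :: c) ++ rest) = _
        rw [List.cons_append, pvALoop, if_neg hcond, hget]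
        simp only [if_pos hv]
        have : (i : Int) + 1 = ((i + 1 : Nat) : Int) := by push_cast; ring
        rw [this, hr3]
      · rw [hdrop, List.cons_prefix_cons]
        constructor
        · intro h
          refine ⟨hv, hr4.mp ?_⟩
          simp at h; omega
        · rintro ⟨-, hp⟩
          have := hr4.mpr hp
          simp; omega
    · obtain ⟨r, hr1, hr2, hr3, hr4⟩ := ih rest i (by simp at hlen ⊢; omega)
      refine ⟨r, hr1, by simp; omega, ?_, ?_⟩
      · show pvALoop act (i : Int) ((L :: c) ++ rest) = _
        rw [List.cons_append, pvALoop, if_neg hcond, hget]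
        simp only [if_neg hv]
        exact hr3
      · constructor
        · intro h; simp at h; omega
        · intro hp
          rw [hdrop, List.cons_prefix_cons] at hp
          exact absurd hp.1 hv

lemma pvArm_cons (a : String) (t : List String) (m : Nat) (hm : 1 ≤ m) (o : Option Nat) :
    pvArm (a :: t) m (o.map (· + 1)) = pvArm t m o := by
  cases o with
  | none => rfl
  | some k =>
    show PySem.List.slice (a :: t) (some (((k + 1 : Nat) : Int) + (m : Int) - 1)) none
        = PySem.List.slice t (some ((k : Int) + (m : Int) - 1)) none
    have h1 : ((k + 1 : Nat) : Int) + (m : Int) - 1 = ((k + m : Nat) : Int) := by push_cast; ring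
    have h2 : (k : Int) + (m : Int) - 1 = ((k + (m - 1) : Nat) : Int) := by
      push_cast [Nat.cast_sub hm]; ring
    rw [h1, h2, PySem.List.slice_from_natCast, PySem.List.slice_from_natCast]
    have : k + m = (k + (m - 1)) + 1 := by omega
    rw [this, List.drop_succ_cons]

-- subblock ends with the mark: it decomposes as dropLast ++ [pvEOF]
lemma pvEofDecomp (sub : List String) (h : sub.getLast? = some pvEOF) :
    sub.dropLast ++ [pvEOF] = sub := by
  have hne : sub ≠ [] := by intro e; subst e; simp at h
  have hLast : sub.getLast hne = pvEOF := by
    rw [List.getLast?_eq_some_getLast hne] at h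
    injection h
  conv_lhs => rw [← hLast]
  exact List.dropLast_append_getLast hne

lemma pre_nil (sub : List String) (h : Pre_the_rest_after [] sub) :
    sub = [] ∨ sub = [pvEOF] := by
  rcases h with h | ⟨h1, h2⟩
  · exact Or.inl (by simpa using h)
  · have hd : sub.dropLast = [] := List.suffix_nil.mp h2
    right
    have := pvEofDecomp sub h1
    rw [hd] at this
    exact this.symm

lemma A_pre (sub : List String) :
    ∀ act : List String, Pre_the_rest_after act sub →
      the_rest_after act sub = pvArm act sub.length (pvFo sub act) := by
  intro act
  induction act with
  | nil =>
    intro hpre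
    rcases pre_nil sub hpre with rfl | rfl
    · rw [the_rest_after]
      norm_num [get_real_subblock_length, pvALoop, pvFo, pvArm, PySem.List.slice]
    · rw [the_rest_after]
      norm_num [get_real_subblock_length, pvEOF, pvALoop, pvFo, pvArm,
        PySem.List.pyGet?, PySem.List.pyIdx?, PySem.List.slice]
  | cons a t ih =>
    intro hpre
    by_cases hp : sub <+: a :: t
    · -- subblock matches at the head
      have hm_le : sub.length ≤ (a :: t).length := hp.length_le
      have hreal : get_real_subblock_length sub ≤ (sub.length : Int) := by
        unfold get_real_subblock_length; split <;> omega
      rw [the_rest_after, if_neg (by simp at hm_le ⊢; omega)]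
      obtain ⟨r, hr1, hr2, hr3, hr4⟩ := pvALoop_core (a :: t) sub [] 0 (by simpa using hm_le)
      have hr : r = sub.length := by have := hr4.mpr (by simpa using hp); omega
      have hloop : pvALoop (a :: t) 0 sub = some (r : Int) := by
        simpa [pvALoop] using hr3
      rw [hloop]
      simp only []
      rw [if_pos (by exact_mod_cast congrArg (Nat.cast : Nat → Int) hr)]
      have hfo : pvFo sub (a :: t) = some 0 := by simp [pvFo, hp]
      rw [hfo]
      show _ = PySem.List.slice (a :: t) (some (((0 : Nat) : Int) + (sub.length : Int) - 1)) none
      have harg : ((r : Int)) - 1 = ((0 : Nat) : Int) + (sub.length : Int) - 1 := by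
        subst hr; push_cast; ring
      rw [harg]
    · by_cases heof : sub = (a :: t) ++ [pvEOF]
      · -- subblock is the whole remaining file plus the end-of-file mark
        have hreal : get_real_subblock_length sub = ((a :: t).length : Int) := by
          rw [heof, get_real_subblock_length, if_pos (by simp)]; simp
        rw [the_rest_after, hreal, if_neg (by omega)]
        obtain ⟨r, hr1, hr2, hr3, hr4⟩ :=
          pvALoop_core (a :: t) (a :: t) [pvEOF] 0 (by simp)
        have hr : r = (a :: t).length := by have := hr4.mpr (by simp); omega
        have hstep : pvALoop (a :: t) ((r : Nat) : Int) [pvEOF]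
            = some (((a :: t).length : Int) + 1) := by
          rw [pvALoop, if_pos ⟨rfl, by rw [hr]⟩]
          simp [pvALoop, hr]
        have hloop : pvALoop (a :: t) 0 sub = some (((a :: t).length : Int) + 1) := by
          rw [heof]
          simpa [pvALoop] using hr3.trans hstep
        rw [hloop]
        simp only []
        rw [if_pos (by rw [heof]; simp)]
        rw [show ((a :: t).length : Int) + 1 - 1 = (((a :: t).length : Nat) : Int) by ring,
          PySem.List.slice_from_natCast, List.drop_length]
        rw [pvFo_none_of_short sub (a :: t) (by rw [heof]; simp)]
        rfl
      · -- no match at the head: A recurses on the tail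
        have hne : sub ≠ [] := by
          intro e; exact hp (e ▸ List.nil_prefix)
        have hm : 1 ≤ sub.length := by
          rcases sub with _ | _
          · exact absurd rfl hne
          · simp
        have hlen : sub.length ≤ (a :: t).length := by
          rcases hpre with hinf | ⟨h1, h2⟩
          · rcases (List.infix_cons_iff.mp hinf) with h | h
            · exact absurd h hp
            · have := h.length_le; simp; omega
          · have hle : sub.dropLast.length ≤ (a :: t).length := h2.length_le
            have hdl : sub.dropLast.length = sub.length - 1 := List.length_dropLast
            rcases Nat.lt_or_ge (sub.length - 1) (a :: t).length with h | h
            · omega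
            · exfalso
              have heq : sub.dropLast = a :: t := h2.eq_of_length (by omega)
              exact heof (by rw [← pvEofDecomp sub h1, heq])
        have hreal : get_real_subblock_length sub ≤ (sub.length : Int) := by
          unfold get_real_subblock_length; split <;> omega
        rw [the_rest_after, if_neg (by simp at hlen ⊢; omega)]
        obtain ⟨r, hr1, hr2, hr3, hr4⟩ := pvALoop_core (a :: t) sub [] 0 (by simpa using hlen)
        have hrne : r ≠ sub.length := by
          intro h
          exact hp (by simpa using hr4.mp (by omega))
        have hloop : pvALoop (a :: t) 0 sub = some (r : Int) := by
          simpa [pvALoop] using hr3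
        rw [hloop]
        simp only []
        rw [if_neg (by exact_mod_cast fun h => hrne (by exact_mod_cast h))]
        have hpre_t : Pre_the_rest_after t sub := by
          rcases hpre with hinf | ⟨h1, h2⟩
          · rcases (List.infix_cons_iff.mp hinf) with h | h
            · exact absurd h hp
            · exact Or.inl h
          · rcases List.suffix_cons_iff.mp h2 with h | h
            · exact absurd (by rw [← pvEofDecomp sub h1, h]) heof
            · exact Or.inr ⟨h1, h⟩
        have hfo : pvFo sub (a :: t) = (pvFo sub t).map (· + 1) := by
          rw [pvFo, if_neg hp]
        rw [hfo, pvArm_cons a t _ hm, ← ih hpre_t]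

lemma pvSliceFrom_shift (a : String) (t : List String) (x : Int) (hx : 0 ≤ x) :
    PySem.List.slice (a :: t) (some (x + 1)) none = PySem.List.slice t (some x) none := by
  obtain ⟨j, rfl⟩ := Int.eq_ofNat_of_zero_le hx
  have : (j : Int) + 1 = ((j + 1 : Nat) : Int) := by push_cast; ring
  rw [this, PySem.List.slice_from_natCast, PySem.List.slice_from_natCast, List.drop_succ_cons]

lemma pvSlice_shift (a : String) (t : List String) (x : Int) (hx : 0 ≤ x) (m : Nat) :
    PySem.List.slice (a :: t) (some (x + 1)) (some (x + 1 + (m : Int)))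
      = PySem.List.slice t (some x) (some (x + (m : Int))) := by
  obtain ⟨j, rfl⟩ := Int.eq_ofNat_of_zero_le hx
  have h1 : (j : Int) + 1 = ((j + 1 : Nat) : Int) := by push_cast; ring
  rw [h1, PySem.List.slice_natCast_add, PySem.List.slice_natCast_add, List.drop_succ_cons]

lemma pvBScan_shift (a : String) (t sub : List String) (m : Nat) (hm : 1 ≤ m) :
    ∀ (n : Nat) (c d : Int), 0 ≤ c → (d - c).toNat = n →
      pvBScan (a :: t) sub (m : Int) (PySem.List.pyRange (c + 1) (d + 1) 1)
        = pvBScan t sub (m : Int) (PySem.List.pyRange c d 1) := by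
  intro n
  induction n with
  | zero =>
    intro c d hc hn
    have hd : d ≤ c := by omega
    rw [PySem.List.pyRange_one_eq_nil (by omega), PySem.List.pyRange_one_eq_nil hd,
      pvBScan_nil, pvBScan_nil]
  | succ n ih =>
    intro c d hc hn
    have hd : c < d := by omega
    rw [PySem.List.pyRange_one_cons (by omega), PySem.List.pyRange_one_cons hd]
    rw [pvBScan, pvBScan]
    rw [pvSlice_shift a t c hc m]
    by_cases hcond : PySem.List.slice t (some c) (some (c + (m : Int))) = sub
    · rw [if_pos hcond, if_pos hcond]
      have hf := pvSliceFrom_shift a t (c + (m : Int) - 1) (by omega)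
      rw [show c + 1 + (m : Int) - 1 = c + (m : Int) - 1 + 1 by ring, hf]
    · rw [if_neg hcond, if_neg hcond]
      exact ih (c + 1) d (by omega) (by omega)

lemma B_scan_eq (sub : List String) :
    ∀ act : List String,
      pvBScan act sub (sub.length : Int)
        (PySem.List.pyRange 0 ((act.length : Int) - (sub.length : Int) + 1) 1)
      = pvArm act sub.length (pvFo sub act) := by
  intro act
  induction act with
  | nil =>
    by_cases hs : sub = []
    · subst hs; decide
    · have hm : 1 ≤ sub.length :=
        Nat.pos_of_ne_zero (fun h => hs (List.length_eq_zero_iff.mp h))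
      rw [PySem.List.pyRange_one_eq_nil (by simp; omega), pvBScan_nil]
      rw [show pvFo sub [] = none by simp [pvFo, hs]]
      rfl
  | cons a t ih =>
    by_cases hp : sub <+: a :: t
    · have hm_le : sub.length ≤ t.length + 1 := by simpa using hp.length_le
      rw [PySem.List.pyRange_one_cons (by simp; omega)]
      rw [pvBScan]
      have hc : PySem.List.slice (a :: t) (some 0) (some (0 + (sub.length : Int))) = sub := by
        rw [PySem.List.slice_zero_start,
          show (0 : Int) + (sub.length : Int) = ((sub.length : Nat) : Int) by ring,
          PySem.List.slice_to_natCast]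
        exact (List.prefix_iff_eq_take.mp hp).symm
      rw [if_pos hc]
      rw [show pvFo sub (a :: t) = some 0 by simp [pvFo, hp]]
      show _ = PySem.List.slice (a :: t) (some (((0 : Nat) : Int) + (sub.length : Int) - 1)) none
      norm_num
    · have hfo : pvFo sub (a :: t) = (pvFo sub t).map (· + 1) := by
        rw [pvFo, if_neg hp]
      have hm : 1 ≤ sub.length := by
        rcases sub with _ | _
        · exact absurd List.nil_prefix hp
        · simp
      by_cases hmn : sub.length ≤ t.length + 1
      · rw [PySem.List.pyRange_one_cons (by simp; omega)]
        rw [pvBScan]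
        have hc : ¬ PySem.List.slice (a :: t) (some 0) (some (0 + (sub.length : Int))) = sub := by
          rw [PySem.List.slice_zero_start,
            show (0 : Int) + (sub.length : Int) = ((sub.length : Nat) : Int) by ring,
            PySem.List.slice_to_natCast]
          intro h
          exact hp (List.prefix_iff_eq_take.mpr h.symm)
        rw [if_neg hc]
        have hb : (((a :: t).length : Int)) - (sub.length : Int) + 1
            = (((t.length : Int)) - (sub.length : Int) + 1) + 1 := by simp; ring
        rw [hb]
        rw [pvBScan_shift a t sub sub.length hm
          (((((t.length : Int)) - (sub.length : Int) + 1) - 0).toNat) 0 _ (le_refl 0) rfl]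
        rw [ih, hfo, pvArm_cons a t _ hm]
      · have hsh : t.length < sub.length := by omega
        rw [PySem.List.pyRange_one_eq_nil (by simp; omega), pvBScan_nil]
        rw [hfo, pvFo_none_of_short sub t hsh]
        rfl

-- ===== VERDICT (by name: the statement is the Claim_ definition above) =====
theorem the_rest_after_spec : Claim_equal_the_rest_after := by
  intro act sub _ hpre
  unfold Spec_the_rest_after the_rest_after_alt
  rw [A_pre sub act hpre, B_scan_eq]
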